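-- pv_equiv track=rewrite | github.com/Yawn-Sean/Daily_CF_Problems | daily_problems/2024/04/0423/personal_submission/cf922d_hum.py | f
-- ===== SOURCE A (Python) =====
-- def f(s):
--   res = 0
--   cnt_s = 0
--   for c in s:
--     if c == 's':
--       cnt_s += 1
--     else:
--       res += cnt_s
--   return res
-- ===== SOURCE B (Python) =====
-- def f(s):
--     total_nons = sum(1 for c in s if c != 's')
--     res = 0
--     nons_seen = 0
--     for c in s:
--         if c == 's':
--             res += total_nons - nons_seen
--         else:
--             nons_seen += 1
--     return res
-- ===== Notes on version B (the rewrite author's own statement) =====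
-- stated objective: alternative
-- what changed: B precomputes the total number of non-'s' characters and accumulates, at each 's', the count of non-'s' characters still to its right (total minus those seen), instead of accumulating the running 's' count at each non-'s' character.
import Mathlib
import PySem

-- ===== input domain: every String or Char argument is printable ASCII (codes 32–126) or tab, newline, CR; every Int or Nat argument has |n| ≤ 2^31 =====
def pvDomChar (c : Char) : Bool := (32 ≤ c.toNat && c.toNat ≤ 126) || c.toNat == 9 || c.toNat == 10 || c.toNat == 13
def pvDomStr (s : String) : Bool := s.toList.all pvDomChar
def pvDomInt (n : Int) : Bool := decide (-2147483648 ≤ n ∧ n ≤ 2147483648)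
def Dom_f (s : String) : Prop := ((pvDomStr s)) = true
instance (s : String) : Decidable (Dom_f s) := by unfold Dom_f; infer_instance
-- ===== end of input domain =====

-- B differs from A by pivoting the accumulation on the 's' positions: it precomputes the
-- total number of non-'s' characters and adds, at each 's', those still to its right.

-- ===== PORT A =====
-- for c in s: if c == 's' then cnt_s += 1 else res += cnt_s; state = (res, cnt_s)
def f (s : String) : Int :=
  (s.toList.foldl
    (fun (st : Int × Int) c => if c = 's' then (st.1, st.2 + 1) else (st.1 + st.2, st.2))
    (0, 0)).1

-- ===== PORT B =====
-- total_nons = sum(1 for c in s if c != 's'); then one pass with state (res, nons_seen)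
def f_alt (s : String) : Int :=
  let totalNons : Int := ((s.toList.filter (fun c => c ≠ 's')).length : Int)
  (s.toList.foldl
    (fun (st : Int × Int) c =>
      if c = 's' then (st.1 + (totalNons - st.2), st.2) else (st.1, st.2 + 1))
    (0, 0)).1

-- ===== PRECONDITION & SPEC =====
def Spec_f (s : String) (out : Int) : Prop := out = f_alt s
instance (s : String) (out : Int) : Decidable (Spec_f s out) := by unfold Spec_f; infer_instance

-- ===== CLAIM (what is proved, stated in full; the proofs are below) =====
def Claim_equal_f : Prop := ∀ (s : String), Dom_f s → Spec_f s (f s)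

-- ===== LEMMAS AND PROOFS =====

-- number of non-'s' characters
def nN (l : List Char) : Int := ((l.filter (fun c => c ≠ 's')).length : Int)
-- number of 's' characters
def kS (l : List Char) : Int := ((l.filter (fun c => c = 's')).length : Int)
-- pairs: 's' strictly before a non-'s'
def pP (l : List Char) : Int :=
  match l with
  | [] => 0
  | c :: t => (if c = 's' then nN t else 0) + pP t
-- pairs: non-'s' strictly before an 's'
def rR (l : List Char) : Int :=
  match l with
  | [] => 0
  | c :: t => (if c = 's' then 0 else kS t) + rR t

lemma foldA_eq (l : List Char) (res cnt : Int) :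
    (l.foldl (fun (st : Int × Int) c =>
        if c = 's' then (st.1, st.2 + 1) else (st.1 + st.2, st.2)) (res, cnt)).1
      = res + cnt * nN l + pP l := by
  induction l generalizing res cnt with
  | nil => simp [nN, pP]
  | cons c t ih =>
    by_cases h : c = 's' <;> simp [h, nN, pP, ih] <;> ring

lemma foldB_eq (T : Int) (l : List Char) (res nons : Int) :
    (l.foldl (fun (st : Int × Int) c =>
        if c = 's' then (st.1 + (T - st.2), st.2) else (st.1, st.2 + 1)) (res, nons)).1
      = res + kS l * (T - nons) - rR l := by
  induction l generalizing res nons with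
  | nil => simp [kS, rR]
  | cons c t ih =>
    by_cases h : c = 's' <;> simp [h, kS, rR, ih] <;> ring

lemma split_pairs (l : List Char) : pP l + rR l = kS l * nN l := by
  induction l with
  | nil => simp [pP, rR, kS, nN]
  | cons c t ih =>
    by_cases h : c = 's' <;>
      simp [pP, rR, kS, nN, h] at ih ⊢ <;> push_cast at ih ⊢ <;> nlinarith [ih]

-- ===== VERDICT (by name: the statement is the Claim_ definition above) =====
theorem f_spec : Claim_equal_f := by
  intro s _
  unfold Spec_f f f_alt
  rw [foldA_eq, foldB_eq]
  have h := split_pairs s.toList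
  show (0 : Int) + 0 * nN s.toList + pP s.toList
      = 0 + kS s.toList * (nN s.toList - 0) - rR s.toList
  linarith
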